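-- pv_equiv track=rewrite | github.com/yangzhang0215/XAUAT-autolib | python/libspace_cli/seminar_standalone.py | _build_segment_durations
-- ===== SOURCE A (Python) =====
-- MAX_SINGLE_RESERVE_MINUTES = 4 * 60
--
-- MIN_FINAL_RESERVE_MINUTES = 60
--
-- RESERVATION_SPLIT_ERROR = (
--     "Requested seminar time cannot be split into reservation windows with segments up to 4 hours, "
--     "15-minute gaps, and a final segment of at least 60 minutes."
-- )
--
-- def _minimum_reserved_minutes(segment_count: int) -> int:
--     if segment_count <= 0:
--         return 0
--     return MIN_FINAL_RESERVE_MINUTES + max(0, segment_count - 1)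
--
-- def _build_segment_durations(total_reserved_minutes: int, segment_count: int) -> tuple[int, ...]:
--     if segment_count <= 0:
--         raise ValueError(RESERVATION_SPLIT_ERROR)
--     if total_reserved_minutes < _minimum_reserved_minutes(segment_count):
--         raise ValueError(RESERVATION_SPLIT_ERROR)
--     if total_reserved_minutes > segment_count * MAX_SINGLE_RESERVE_MINUTES:
--         raise ValueError(RESERVATION_SPLIT_ERROR)
--
--     durations: list[int] = []
--     remaining_minutes = total_reserved_minutes
--     for index in range(segment_count):
--         remaining_segments = segment_count - index
--         if remaining_segments == 1:
--             duration = remaining_minutes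
--         else:
--             minimum_after_current = _minimum_reserved_minutes(remaining_segments - 1)
--             duration = min(MAX_SINGLE_RESERVE_MINUTES, remaining_minutes - minimum_after_current)
--         if duration <= 0 or duration > MAX_SINGLE_RESERVE_MINUTES:
--             raise ValueError(RESERVATION_SPLIT_ERROR)
--         durations.append(duration)
--         remaining_minutes -= duration
--
--     if remaining_minutes != 0 or durations[-1] < MIN_FINAL_RESERVE_MINUTES:
--         raise ValueError(RESERVATION_SPLIT_ERROR)
--     return tuple(durations)
-- ===== SOURCE B (Python) =====
-- MAX_SINGLE_RESERVE_MINUTES = 4 * 60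
--
-- MIN_FINAL_RESERVE_MINUTES = 60
--
-- RESERVATION_SPLIT_ERROR = (
--     "Requested seminar time cannot be split into reservation windows with segments up to 4 hours, "
--     "15-minute gaps, and a final segment of at least 60 minutes."
-- )
--
-- def _build_segment_durations(total_reserved_minutes: int, segment_count: int) -> tuple[int, ...]:
--     # closed-form greedy: every non-final segment starts at 1 minute, the final at 60;
--     # the surplus is poured into the segments front to back, 239 extra minutes each.
--     if segment_count <= 0:
--         raise ValueError(RESERVATION_SPLIT_ERROR)
--     if total_reserved_minutes < MIN_FINAL_RESERVE_MINUTES + segment_count - 1: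
--         raise ValueError(RESERVATION_SPLIT_ERROR)
--     if total_reserved_minutes > segment_count * MAX_SINGLE_RESERVE_MINUTES:
--         raise ValueError(RESERVATION_SPLIT_ERROR)
--     surplus = total_reserved_minutes - (MIN_FINAL_RESERVE_MINUTES + segment_count - 1)
--     fill = MAX_SINGLE_RESERVE_MINUTES - 1
--     body = [1 + min(fill, max(0, surplus - fill * i)) for i in range(segment_count - 1)]
--     last = MIN_FINAL_RESERVE_MINUTES + max(0, surplus - fill * (segment_count - 1))
--     return tuple(body + [last])
-- ===== Notes on version B (the rewrite author's own statement) =====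
-- stated objective: alternative
-- what changed: Replaces A's sequential loop carrying a 'remaining minutes' accumulator (recomputing the minimum needed by the segments after the current one at each step) with a closed per-index formula: surplus over the global minimum is computed once and segment i's duration is 1 + min(239, max(0, surplus - 239*i)) (final: 60 + max(0, surplus - 239*(k-1))), built by a comprehension with no running state.
import Mathlib
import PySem

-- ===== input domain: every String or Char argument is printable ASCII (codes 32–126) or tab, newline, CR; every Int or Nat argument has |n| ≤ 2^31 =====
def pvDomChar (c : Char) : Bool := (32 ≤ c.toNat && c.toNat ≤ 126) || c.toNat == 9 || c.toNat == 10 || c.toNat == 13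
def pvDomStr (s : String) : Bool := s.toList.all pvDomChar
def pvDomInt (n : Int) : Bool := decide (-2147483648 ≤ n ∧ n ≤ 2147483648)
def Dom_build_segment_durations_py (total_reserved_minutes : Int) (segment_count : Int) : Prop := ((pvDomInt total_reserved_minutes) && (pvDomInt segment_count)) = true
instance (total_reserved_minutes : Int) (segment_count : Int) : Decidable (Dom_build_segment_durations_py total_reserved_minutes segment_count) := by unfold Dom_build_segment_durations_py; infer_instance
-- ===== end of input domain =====

-- B replaces A's accumulator loop with a closed per-index surplus formula (same cost, no running state);
-- the proof shows A's in-loop raises are dead code under the three guards (= Pre_).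

-- ===== PORT A =====
-- Python min(a, b): returns a when a ≤ b
def pyMin (a b : Int) : Int := if b < a then b else a

def minimum_reserved_minutes (segment_count : Int) : Int :=
  if segment_count ≤ 0 then 0 else 60 + max 0 (segment_count - 1)

-- the loop body; `none` models a raised ValueError (excluded by Pre_)
def aStep (segment_count : Int) (st : Option (List Int × Int)) (index : Int) :
    Option (List Int × Int) :=
  match st with
  | none => none
  | some (durations, remaining_minutes) =>
    let remaining_segments := segment_count - index
    let duration :=
      if remaining_segments == 1 then remaining_minutes
      else pyMin (4 * 60) (remaining_minutes - minimum_reserved_minutes (remaining_segments - 1))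
    if duration ≤ 0 ∨ duration > 4 * 60 then none
    else some (durations ++ [duration], remaining_minutes - duration)

def build_segment_durations_py (total_reserved_minutes : Int) (segment_count : Int) : List Int :=
  -- the three guard raises and the final raise return [] here; all raising inputs are outside Pre_
  if segment_count ≤ 0 then []
  else if total_reserved_minutes < minimum_reserved_minutes segment_count then []
  else if total_reserved_minutes > segment_count * (4 * 60) then []
  else
    match (PySem.List.pyRange 0 segment_count 1).foldl (aStep segment_count)
        (some ([], total_reserved_minutes)) with
    | none => []
    | some (durations, remaining_minutes) =>
      -- 'remaining != 0 or durations[-1] < 60' evaluated left to right; durations[-1] = pyGet? (-1)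
      if remaining_minutes ≠ 0 then []
      else match PySem.List.pyGet? durations (-1) with
        | none => []  -- IndexError (unreachable under the guards)
        | some d => if d < 60 then [] else durations

-- ===== PORT B =====
def build_segment_durations_py_alt (total_reserved_minutes : Int) (segment_count : Int) : List Int :=
  if segment_count ≤ 0 then []
  else if total_reserved_minutes < 60 + segment_count - 1 then []
  else if total_reserved_minutes > segment_count * (4 * 60) then []
  else
    let surplus := total_reserved_minutes - (60 + segment_count - 1)
    let fill : Int := 4 * 60 - 1
    let body := (PySem.List.pyRange 0 (segment_count - 1) 1).map
      (fun i => 1 + pyMin fill (max 0 (surplus - fill * i)))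
    let last := 60 + max 0 (surplus - fill * (segment_count - 1))
    body ++ [last]

-- ===== PRECONDITION & SPEC =====
-- Pre_ = exactly the inputs on which Python A returns (all four raise sites excluded; B raises on the same inputs)
def Pre_build_segment_durations_py (total_reserved_minutes : Int) (segment_count : Int) : Prop :=
  1 ≤ segment_count ∧ 60 + (segment_count - 1) ≤ total_reserved_minutes ∧
    total_reserved_minutes ≤ segment_count * 240

instance (total_reserved_minutes : Int) (segment_count : Int) : Decidable (Pre_build_segment_durations_py total_reserved_minutes segment_count) := by unfold Pre_build_segment_durations_py; infer_instance

def pvWitness_build_segment_durations_py : Int × Int := (500, 3)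

def Spec_build_segment_durations_py (total_reserved_minutes : Int) (segment_count : Int) (out : List Int) : Prop := out = build_segment_durations_py_alt total_reserved_minutes segment_count
instance (total_reserved_minutes : Int) (segment_count : Int) (out : List Int) : Decidable (Spec_build_segment_durations_py total_reserved_minutes segment_count out) := by unfold Spec_build_segment_durations_py; infer_instance

-- ===== CLAIM (what is proved, stated in full; the proofs are below) =====
def Claim_equal_build_segment_durations_py : Prop := ∀ (total_reserved_minutes : Int) (segment_count : Int), Dom_build_segment_durations_py total_reserved_minutes segment_count → Pre_build_segment_durations_py total_reserved_minutes segment_count → Spec_build_segment_durations_py total_reserved_minutes segment_count (build_segment_durations_py total_reserved_minutes segment_count)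

-- ===== LEMMAS AND PROOFS =====

-- the invariant: having consumed indices [0, j), remaining = 60 + (k-1-j) + max 0 (s - 239*j),
-- the durations so far are B's first j entries, and the fold over [j, k) finishes with remainder 0
-- producing exactly B's list.
lemma aLoop_inv (k s : Int) (hcap : s ≤ 239 * (k - 1) + 180) :
    ∀ (n : Nat) (j : Int) (ds : List Int), 0 ≤ j → j ≤ k - 1 → j + n = k →
    (PySem.List.pyRange j k 1).foldl (aStep k)
        (some (ds, 60 + (k - 1 - j) + max 0 (s - 239 * j)))
      = some (ds ++ ((PySem.List.pyRange j (k - 1) 1).map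
            (fun i => 1 + pyMin 239 (max 0 (s - 239 * i)))
          ++ [60 + max 0 (s - 239 * (k - 1))]), 0) := by
  intro n
  induction n with
  | zero => intro j ds hj hj1 hjk; omega
  | succ m ih =>
    intro j ds hj hj1 hjk
    have hjlt : j < k := by omega
    rw [PySem.List.pyRange_one_cons hjlt]
    by_cases hlast : j = k - 1
    · -- final segment: remaining_segments = 1, duration = remaining
      subst hlast
      have hm : m = 0 := by omega
      subst hm
      have h1 : PySem.List.pyRange (k - 1 + 1) k 1 = [] := by
        simp [PySem.List.pyRange]
      have h2 : PySem.List.pyRange (k - 1) (k - 1) 1 = [] := by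
        simp [PySem.List.pyRange]
      rw [List.foldl_cons, h1, h2]
      simp only [aStep, List.foldl_nil]
      have hrs : (k - (k - 1) == 1) = true := by simp only [beq_iff_eq]; omega
      rw [if_pos hrs]
      rw [show (60 + (k - 1 - (k - 1)) + max 0 (s - 239 * (k - 1)) : Int)
            = 60 + max 0 (s - 239 * (k - 1)) from by omega]
      have hcond : ¬ (60 + max 0 (s - 239 * (k - 1)) ≤ 0 ∨
          60 + max 0 (s - 239 * (k - 1)) > 4 * 60) := by omega
      rw [if_neg hcond]
      simp only [List.map_nil, List.nil_append, Option.some.injEq, Prod.mk.injEq]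
      exact ⟨trivial, by omega⟩
    · -- non-final segment
      have hjlt' : j < k - 1 := by omega
      rw [List.foldl_cons]
      simp only [aStep]
      have hrs : ¬ ((k - j == 1) = true) := by simp only [beq_iff_eq]; omega
      rw [if_neg hrs]
      have hmin : minimum_reserved_minutes (k - j - 1) = 60 + (k - j - 2) := by
        unfold minimum_reserved_minutes
        rw [if_neg (by omega)]
        omega
      rw [hmin]
      set M := max 0 (s - 239 * j) with hM
      have hM0 : 0 ≤ M := le_max_left _ _
      have hdur : pyMin (4 * 60) (60 + (k - 1 - j) + M - (60 + (k - j - 2)))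
          = 1 + pyMin 239 M := by
        unfold pyMin; split_ifs <;> omega
      rw [hdur]
      have hcond : ¬ (1 + pyMin 239 M ≤ 0 ∨ 1 + pyMin 239 M > 4 * 60) := by
        unfold pyMin; split_ifs <;> omega
      rw [if_neg hcond]
      have hrem : 60 + (k - 1 - j) + M - (1 + pyMin 239 M)
          = 60 + (k - 1 - (j + 1)) + max 0 (s - 239 * (j + 1)) := by
        unfold pyMin; split_ifs <;> omega
      rw [hrem]
      rw [ih (j + 1) (ds ++ [1 + pyMin 239 M]) (by omega) (by omega) (by omega)]
      rw [PySem.List.pyRange_one_cons hjlt', List.map_cons, List.append_assoc]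
      simp [hM]

lemma pyGet_last (xs : List Int) (x : Int) :
    PySem.List.pyGet? (xs ++ [x]) (-1) = some x := by
  simp [PySem.List.pyGet?, PySem.List.pyIdx?]

-- ===== VERDICT (by name: the statement is the Claim_ definition above) =====
theorem build_segment_durations_py_spec : Claim_equal_build_segment_durations_py := by
  intro t k _ hpre
  obtain ⟨hk, hlo, hhi⟩ := hpre
  unfold Spec_build_segment_durations_py
  unfold build_segment_durations_py build_segment_durations_py_alt
  have hmin : minimum_reserved_minutes k = 60 + (k - 1) := by
    unfold minimum_reserved_minutes; rw [if_neg (by omega)]; omega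
  rw [if_neg (by omega : ¬ k ≤ 0), if_neg (by omega : ¬ k ≤ 0)]
  rw [hmin]
  rw [if_neg (by omega : ¬ t < 60 + (k - 1)), if_neg (by omega : ¬ t < 60 + k - 1)]
  rw [if_neg (by omega : ¬ t > k * (4 * 60)), if_neg (by omega : ¬ t > k * (4 * 60))]
  set s := t - (60 + k - 1) with hs
  have hstart : (some (([] : List Int), t) : Option (List Int × Int))
      = some (([] : List Int), 60 + (k - 1 - 0) + max 0 (s - 239 * 0)) := by
    rw [show 60 + (k - 1 - 0) + max 0 (s - 239 * 0) = t from by omega]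
  rw [hstart,
    aLoop_inv k s (by omega) k.toNat 0 [] le_rfl (by omega) (by omega)]
  simp only [List.nil_append]
  rw [if_neg (by omega : ¬ (0 : Int) ≠ 0)]
  rw [pyGet_last]
  dsimp only
  rw [if_neg (by omega : ¬ 60 + max 0 (s - 239 * (k - 1)) < 60)]
  rw [show (4 * 60 - 1 : Int) = 239 from by norm_num]
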